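-- pv_equiv track=rewrite | github.com/Mohamedhabi/flow_shop_scheduling | fsp/parallel_bnb.py | totalCounts
-- ===== SOURCE A (Python) =====
-- def totalCounts(sols_dict):
--     data = [0,0,0]
--     for key,val in sols_dict:
--         costs = val["costs"]
--         data[0]+=costs[0]
--         data[1]+=costs[1]
--         data[2]+=costs[2]
--     return data
-- ===== SOURCE B (Python) =====
-- def totalCounts(sols_dict):
--     return [sum(val["costs"][i] for _, val in sols_dict) for i in range(3)]
-- ===== Notes on version B (the rewrite author's own statement) =====
-- stated objective: simpler
-- what changed: Replaces the single loop mutating a three-slot accumulator list with three independent generator-sum passes, one per cost component.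
import Mathlib
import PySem

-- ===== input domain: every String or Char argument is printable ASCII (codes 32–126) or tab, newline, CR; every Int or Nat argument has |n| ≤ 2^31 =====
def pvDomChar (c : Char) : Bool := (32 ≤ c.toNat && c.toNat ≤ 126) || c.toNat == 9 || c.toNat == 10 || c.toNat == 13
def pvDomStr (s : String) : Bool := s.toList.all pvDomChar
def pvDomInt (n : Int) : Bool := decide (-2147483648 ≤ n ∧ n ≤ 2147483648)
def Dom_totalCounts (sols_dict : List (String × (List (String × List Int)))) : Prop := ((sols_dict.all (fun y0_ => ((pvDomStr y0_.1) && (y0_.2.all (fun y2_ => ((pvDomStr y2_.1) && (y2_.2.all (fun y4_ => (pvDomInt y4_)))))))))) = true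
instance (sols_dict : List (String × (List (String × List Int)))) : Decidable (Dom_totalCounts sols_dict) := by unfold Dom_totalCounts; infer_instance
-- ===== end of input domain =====

-- B replaces A's single loop over a mutable three-slot list by three independent per-component sum passes (same O(n) cost, simpler decomposition).


-- ===== PORT A =====
-- one pass, data = (data[0], data[1], data[2]); the defaults of getD/pyGetD are never used inside Pre_
def totalCounts (sols_dict : List (String × (List (String × List Int)))) : List Int :=
  let data := sols_dict.foldl
    (fun (data : Int × Int × Int) kv =>
      let costs := (PySem.Dict.ofList kv.2).getD "costs" []
      (data.1 + PySem.List.pyGetD costs 0 0,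
       data.2.1 + PySem.List.pyGetD costs 1 0,
       data.2.2 + PySem.List.pyGetD costs 2 0))
    (0, 0, 0)
  [data.1, data.2.1, data.2.2]

-- ===== PORT B =====
-- sum(val["costs"][i] for _, val in sols_dict)
def sumCost (sols_dict : List (String × (List (String × List Int)))) (i : Int) : Int :=
  sols_dict.foldl (fun acc kv => acc + PySem.List.pyGetD ((PySem.Dict.ofList kv.2).getD "costs" []) i 0) 0

def totalCounts_alt (sols_dict : List (String × (List (String × List Int)))) : List Int :=
  [sumCost sols_dict 0, sumCost sols_dict 1, sumCost sols_dict 2]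

-- ===== PRECONDITION & SPEC =====
-- Pre_ excludes exactly the inputs where the Python A raises: an entry without a "costs" key (KeyError) or with fewer than 3 costs (IndexError); B raises there too.
def Pre_totalCounts (sols_dict : List (String × (List (String × List Int)))) : Prop :=
  ∀ kv ∈ sols_dict, (PySem.Dict.ofList kv.2).contains "costs" = true ∧
    3 ≤ ((PySem.Dict.ofList kv.2).getD "costs" []).length
instance (sols_dict : List (String × (List (String × List Int)))) : Decidable (Pre_totalCounts sols_dict) := by unfold Pre_totalCounts; infer_instance

def pvWitness_totalCounts : (List (String × (List (String × List Int)))) :=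
  [("k", [("costs", [1, 2, 3])]), ("j", [("costs", [4, 5, -6]), ("x", [])])]

def Spec_totalCounts (sols_dict : List (String × (List (String × List Int)))) (out : List Int) : Prop := out = totalCounts_alt sols_dict
instance (sols_dict : List (String × (List (String × List Int)))) (out : List Int) : Decidable (Spec_totalCounts sols_dict out) := by unfold Spec_totalCounts; infer_instance

-- ===== CLAIM (what is proved, stated in full; the proofs are below) =====
def Claim_equal_totalCounts : Prop := ∀ (sols_dict : List (String × (List (String × List Int)))), Dom_totalCounts sols_dict → Pre_totalCounts sols_dict → Spec_totalCounts sols_dict (totalCounts sols_dict)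

-- ===== LEMMAS AND PROOFS =====

-- shifting the accumulator out of a summing fold
lemma foldl_add_shift {α : Type} (l : List α) (f : α → Int) (x : Int) :
    l.foldl (fun acc kv => acc + f kv) x = x + l.foldl (fun acc kv => acc + f kv) 0 := by
  induction l generalizing x with
  | nil => simp
  | cons h t ih => simp only [List.foldl_cons]; rw [ih (x + f h), ih (0 + f h)]; ring

lemma sumCost_cons (kv : String × (List (String × List Int)))
    (t : List (String × (List (String × List Int)))) (i : Int) :
    sumCost (kv :: t) i =
      PySem.List.pyGetD ((PySem.Dict.ofList kv.2).getD "costs" []) i 0 + sumCost t i := by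
  unfold sumCost
  simp only [List.foldl_cons, zero_add]
  exact foldl_add_shift t _ _

-- A's fold computes the three component sums, for any starting accumulator
lemma foldA_eq (sols_dict : List (String × (List (String × List Int)))) (a b c : Int) :
    sols_dict.foldl
      (fun (data : Int × Int × Int) kv =>
        let costs := (PySem.Dict.ofList kv.2).getD "costs" []
        (data.1 + PySem.List.pyGetD costs 0 0,
         data.2.1 + PySem.List.pyGetD costs 1 0,
         data.2.2 + PySem.List.pyGetD costs 2 0))
      (a, b, c)
    = (a + sumCost sols_dict 0, b + sumCost sols_dict 1, c + sumCost sols_dict 2) := by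
  induction sols_dict generalizing a b c with
  | nil => simp [sumCost]
  | cons kv t ih =>
    simp only [List.foldl_cons]
    rw [ih]
    simp only [sumCost_cons]
    refine Prod.ext (by ring) (Prod.ext (by ring) (by ring))

-- ===== VERDICT (by name: the statement is the Claim_ definition above) =====
theorem totalCounts_spec : Claim_equal_totalCounts := by
  intro s _ _
  show totalCounts s = totalCounts_alt s
  unfold totalCounts totalCounts_alt
  rw [foldA_eq]
  simp
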